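-- pv_equiv track=rewrite | github.com/huangyunict/euler_project | solutions/solution_504.py | solve_p504
-- ===== SOURCE A (Python) =====
-- from math import gcd, isqrt
--
-- def solve_p504(m: int) -> int:
--     result = 0
--     all_range = list(range(1, m + 1))
--     for a in all_range:
--         for b in all_range:
--             for c in all_range:
--                 for d in all_range:
--                     cnt = (a * b + b * c + c * d + d * a - gcd(a, b) - gcd(b, c) - gcd(c, d) - gcd(d, a) + 2) // 2
--                     root = isqrt(cnt)
--                     if root * root == cnt:
--                         result += 1
--     return result
-- ===== SOURCE B (Python) =====
-- from math import gcd, isqrt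
--
-- def solve_p504(m: int) -> int:
--     # Count by value-multiplicity: for each (b, d), tally the multiset of
--     # P(x) = f(x,b) + f(x,d) (f(x,y) = x*y - gcd(x,y)) in a frequency dict,
--     # then add n1*n2 for every pair of distinct values whose lattice count
--     # 1 + (v1+v2)//2 is a perfect square, instead of enumerating (a, c) pairs.
--     result = 0
--     for b in range(1, m + 1):
--         for d in range(1, m + 1):
--             freq = {}
--             for x in range(1, m + 1):
--                 v = x * b - gcd(x, b) + x * d - gcd(x, d)
--                 freq[v] = freq.get(v, 0) + 1
--             for v1, n1 in freq.items():
--                 for v2, n2 in freq.items():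
--                     s = 1 + (v1 + v2) // 2
--                     r = isqrt(s)
--                     if r * r == s:
--                         result += n1 * n2
--     return result
-- ===== Notes on version B (the rewrite author's own statement) =====
-- stated objective: alternative
-- what changed: Instead of testing each (a,b,c,d) quadruple independently, B fixes (b,d), tallies the multiset of values P(x)=f(x,b)+f(x,d) into a frequency dictionary, and counts matching pairs by multiplying multiplicities n1*n2 over distinct value pairs, so the quadruple enumeration is replaced by hash aggregation over distinct values.
import Mathlib
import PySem

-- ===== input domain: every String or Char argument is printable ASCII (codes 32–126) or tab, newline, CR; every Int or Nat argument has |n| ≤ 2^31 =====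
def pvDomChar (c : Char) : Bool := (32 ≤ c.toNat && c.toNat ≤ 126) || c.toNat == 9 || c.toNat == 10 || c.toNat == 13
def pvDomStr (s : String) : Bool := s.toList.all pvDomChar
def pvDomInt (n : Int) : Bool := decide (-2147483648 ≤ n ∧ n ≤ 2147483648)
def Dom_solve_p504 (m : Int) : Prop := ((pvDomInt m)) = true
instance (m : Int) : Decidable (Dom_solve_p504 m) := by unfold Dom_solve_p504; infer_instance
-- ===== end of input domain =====

-- B replaces A's independent-quadruple enumeration by, per (b,d), a frequency dictionary of the
-- values P(x)=f(x,b)+f(x,d) and counts matching pairs by multiplying multiplicities (objective: alternative).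

-- ===== PORT A =====
-- innermost loop body of A (cnt / isqrt / perfect-square test); isqrt via Nat.sqrt is
-- exact because cnt ≥ 1 whenever a,b,c,d ≥ 1 (x*y ≥ gcd x y)
def pA_d (a b c : Int) (result : Int) (d : Int) : Int :=
  let cnt := PySem.Int.floordiv
    (a*b + b*c + c*d + d*a - (Int.gcd a b : Int) - (Int.gcd b c : Int)
      - (Int.gcd c d : Int) - (Int.gcd d a : Int) + 2) 2
  let root : Int := Int.ofNat (Nat.sqrt cnt.toNat)
  if root * root = cnt then result + 1 else result

def solve_p504 (m : Int) : Int :=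
  let all_range := PySem.List.pyRange 1 (m+1) 1
  all_range.foldl (fun result a =>
    all_range.foldl (fun result b =>
      all_range.foldl (fun result c =>
        all_range.foldl (pA_d a b c) result) result) result) 0

-- ===== PORT B =====
-- innermost loop body of B: s = 1 + (v1+v2)//2, perfect-square test, add n1*n2
def pB_inner (v1 : Int × Int) (result : Int) (v2 : Int × Int) : Int :=
  let s := 1 + PySem.Int.floordiv (v1.1 + v2.1) 2
  let r : Int := Int.ofNat (Nat.sqrt s.toNat)
  if r * r = s then result + v1.2 * v2.2 else result

def solve_p504_alt (m : Int) : Int :=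
  (PySem.List.pyRange 1 (m+1) 1).foldl (fun result b =>
    (PySem.List.pyRange 1 (m+1) 1).foldl (fun result d =>
      let freq := (PySem.List.pyRange 1 (m+1) 1).foldl
        (fun dct x =>
          let v := x*b - (Int.gcd x b : Int) + x*d - (Int.gcd x d : Int)
          dct.insert v (dct.getD v 0 + 1)) (PySem.Dict.empty)
      freq.items.foldl (fun result v1 =>
        freq.items.foldl (pB_inner v1) result) result) result) 0

-- ===== PRECONDITION & SPEC =====
def Spec_solve_p504 (m : Int) (out : Int) : Prop := out = solve_p504_alt m
instance (m : Int) (out : Int) : Decidable (Spec_solve_p504 m out) := by unfold Spec_solve_p504; infer_instance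

-- ===== CLAIM (what is proved, stated in full; the proofs are below) =====
def Claim_equal_solve_p504 : Prop := ∀ (m : Int), Dom_solve_p504 m → Spec_solve_p504 m (solve_p504 m)

-- ===== LEMMAS AND PROOFS =====

-- the perfect-square 0/1 indicator on x = (sum of the four f-terms); cnt = (x+2)//2
def pvInd (x : Int) : Int :=
  let cnt := PySem.Int.floordiv (x + 2) 2
  let root : Int := Int.ofNat (Nat.sqrt cnt.toNat)
  if root * root = cnt then 1 else 0

def pvA (a b c d : Int) : Int :=
  pvInd (a*b + b*c + c*d + d*a - (Int.gcd a b : Int) - (Int.gcd b c : Int)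
    - (Int.gcd c d : Int) - (Int.gcd d a : Int))

def pvP (b d x : Int) : Int := x*b - (Int.gcd x b : Int) + x*d - (Int.gcd x d : Int)

lemma pv_foldl_shift {α : Type} (t : α → Int) (f : Int → α → Int)
    (h : ∀ r x, f r x = r + t x) :
    ∀ (l : List α) (init : Int), l.foldl f init = init + (l.map t).sum := by
  intro l
  induction l with
  | nil => intro init; simp
  | cons x xs ih =>
      intro init
      simp only [List.foldl_cons, List.map_cons, List.sum_cons, h]
      rw [ih]; ring

lemma pv_sum_map_add {α : Type} (l : List α) (f g : α → Int) :
    (l.map (fun x => f x + g x)).sum = (l.map f).sum + (l.map g).sum := by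
  induction l with
  | nil => simp
  | cons x xs ih => simp only [List.map_cons, List.sum_cons, ih]; ring

lemma pv_sum_swap {α β : Type} (g : α → β → Int) (l : List α) (l' : List β) :
    (l.map (fun a => (l'.map (g a)).sum)).sum
      = (l'.map (fun b => (l.map (fun a => g a b)).sum)).sum := by
  induction l with
  | nil => simp
  | cons a l ih =>
      simp only [List.map_cons, List.sum_cons, ih]
      rw [pv_sum_map_add l' (fun b => g a b) (fun b => (l.map (fun a => g a b)).sum)]

lemma pA_d_eq (a b c r d : Int) : pA_d a b c r d = r + pvA a b c d := by
  simp only [pA_d, pvA, pvInd]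
  split <;> ring

-- (x+2)//2 = 1 + x//2
lemma pv_floordiv_shift (x : Int) :
    PySem.Int.floordiv (x + 2) 2 = 1 + PySem.Int.floordiv x 2 := by
  rw [PySem.Int.floordiv_eq_ediv_of_pos (by norm_num),
      PySem.Int.floordiv_eq_ediv_of_pos (by norm_num)]
  omega

lemma pB_inner_eq (v1 : Int × Int) (r : Int) (v2 : Int × Int) :
    pB_inner v1 r v2 = r + v1.2 * (v2.2 * pvInd (v1.1 + v2.1)) := by
  simp only [pB_inner, pvInd, pv_floordiv_shift]
  split <;> ring

-- Σ over a nodup list of (if v = x then 1 else 0) * f v picks f x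
lemma pv_pick_zero (f : Int → Int) (K : List Int) (x : Int) (hx : x ∉ K) :
    (K.map (fun v => (if v = x then (1:Int) else 0) * f v)).sum = 0 := by
  induction K with
  | nil => simp
  | cons a K ih =>
      simp only [List.map_cons, List.sum_cons]
      rw [if_neg (by rintro rfl; exact hx (by simp)), ih (fun h => hx (List.mem_cons_of_mem _ h))]
      ring

lemma pv_pick_one (f : Int → Int) (K : List Int) (hnd : K.Nodup) (x : Int) (hx : x ∈ K) :
    (K.map (fun v => (if v = x then (1:Int) else 0) * f v)).sum = f x := by
  induction K with
  | nil => cases hx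
  | cons a K ih =>
      simp only [List.map_cons, List.sum_cons]
      rcases List.mem_cons.mp hx with h | h
      · subst h
        rw [if_pos rfl, pv_pick_zero f K x (List.nodup_cons.mp hnd).1]
        ring
      · rw [if_neg (by rintro rfl; exact (List.nodup_cons.mp hnd).1 h),
            ih (List.nodup_cons.mp hnd).2 h]
        ring

-- counter expansion: Σ over a nodup superset K of count·f equals Σ over the list of f
lemma pv_expand (f : Int → Int) (K : List Int) (hnd : K.Nodup) :
    ∀ (xs : List Int), (∀ y ∈ xs, y ∈ K) →
      (K.map (fun v => (xs.count v : Int) * f v)).sum = (xs.map f).sum := by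
  intro xs
  induction xs with
  | nil => intro _; simp
  | cons a xs ih =>
      intro hsub
      have hstep : ∀ v : Int, (((a :: xs).count v : Int)) * f v
          = (xs.count v : Int) * f v + (if v = a then (1:Int) else 0) * f v := by
        intro v
        by_cases h : v = a
        · subst h; rw [List.count_cons_self, if_pos rfl]; push_cast; ring
        · rw [List.count_cons_of_ne (fun h1 => h h1.symm), if_neg h]; ring
      simp only [hstep]
      rw [pv_sum_map_add, ih (fun y hy => hsub y (List.mem_cons_of_mem _ hy)),
          pv_pick_one f K hnd a (hsub a (by simp))]
      simp only [List.map_cons, List.sum_cons]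
      ring

-- per-(b,d): the frequency-dict double loop equals the brute double sum over the value list
lemma pv_items_pairs (P : List Int) (result : Int) :
    ((PySem.Dict.counter P).items).foldl (fun r v1 =>
        ((PySem.Dict.counter P).items).foldl (pB_inner v1) r) result
      = result + (P.map (fun a => (P.map (fun c => pvInd (a + c))).sum)).sum := by
  rw [pv_foldl_shift
        (fun v1 => (((PySem.Dict.counter P).items).map
          (fun v2 => v1.2 * (v2.2 * pvInd (v1.1 + v2.1)))).sum)
        _ (fun r v1 => pv_foldl_shift _ _ (pB_inner_eq v1) _ r)]
  congr 1
  have hitems : (PySem.Dict.counter P).items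
      = (PySem.Set.ofList P).map (fun k => (k, (P.count k : Int))) :=
    PySem.Dict.items_counter P
  rw [hitems]
  simp only [List.map_map, Function.comp_def]
  have hnd : (PySem.Set.ofList P).Nodup := PySem.Set.nodup_ofList P
  have hsub : ∀ y ∈ P, y ∈ PySem.Set.ofList P := fun y hy => (PySem.Set.mem_ofList P y).mpr hy
  have hinner : ∀ k : Int,
      ((PySem.Set.ofList P).map (fun c => (P.count c : Int) * pvInd (k + c))).sum
        = (P.map (fun c => pvInd (k + c))).sum :=
    fun k => pv_expand (fun c => pvInd (k + c)) _ hnd P hsub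
  calc ((PySem.Set.ofList P).map (fun k =>
          ((PySem.Set.ofList P).map (fun c => (P.count k : Int) * ((P.count c : Int) * pvInd (k + c)))).sum)).sum
      = ((PySem.Set.ofList P).map (fun k => (P.count k : Int) * (P.map (fun c => pvInd (k + c))).sum)).sum := by
        refine congrArg List.sum (List.map_congr_left ?_)
        intro k _
        rw [List.sum_map_mul_left (PySem.Set.ofList P) (fun c => ((P.count c : Int)) * pvInd (k + c)) ((P.count k : Int)), hinner k]
    _ = (P.map (fun a => (P.map (fun c => pvInd (a + c))).sum)).sum :=
        pv_expand (fun a => (P.map (fun c => pvInd (a + c))).sum) _ hnd P hsub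

lemma portA_sum (m : Int) :
    solve_p504 m =
      ((PySem.List.pyRange 1 (m+1) 1).map (fun a =>
        ((PySem.List.pyRange 1 (m+1) 1).map (fun b =>
          ((PySem.List.pyRange 1 (m+1) 1).map (fun c =>
            ((PySem.List.pyRange 1 (m+1) 1).map (fun d => pvA a b c d)).sum)).sum)).sum)).sum := by
  unfold solve_p504
  rw [pv_foldl_shift (fun a =>
        ((PySem.List.pyRange 1 (m+1) 1).map (fun b =>
          ((PySem.List.pyRange 1 (m+1) 1).map (fun c =>
            ((PySem.List.pyRange 1 (m+1) 1).map (fun d => pvA a b c d)).sum)).sum)).sum) _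
      (fun r a => by
        rw [pv_foldl_shift (fun b =>
              ((PySem.List.pyRange 1 (m+1) 1).map (fun c =>
                ((PySem.List.pyRange 1 (m+1) 1).map (fun d => pvA a b c d)).sum)).sum) _
            (fun r b => by
              rw [pv_foldl_shift (fun c =>
                    ((PySem.List.pyRange 1 (m+1) 1).map (fun d => pvA a b c d)).sum) _
                  (fun r c => by
                    rw [pv_foldl_shift (pvA a b c) _ (pA_d_eq a b c)])])])]
  rw [zero_add]

lemma portB_sum (m : Int) :
    solve_p504_alt m =
      ((PySem.List.pyRange 1 (m+1) 1).map (fun b =>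
        ((PySem.List.pyRange 1 (m+1) 1).map (fun d =>
          ((PySem.List.pyRange 1 (m+1) 1).map (fun a =>
            ((PySem.List.pyRange 1 (m+1) 1).map (fun c =>
              pvInd (pvP b d a + pvP b d c))).sum)).sum)).sum)).sum := by
  unfold solve_p504_alt
  rw [pv_foldl_shift (fun b =>
        ((PySem.List.pyRange 1 (m+1) 1).map (fun d =>
          ((PySem.List.pyRange 1 (m+1) 1).map (fun a =>
            ((PySem.List.pyRange 1 (m+1) 1).map (fun c =>
              pvInd (pvP b d a + pvP b d c))).sum)).sum)).sum) _
      (fun r b => by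
        rw [pv_foldl_shift (fun d =>
              ((PySem.List.pyRange 1 (m+1) 1).map (fun a =>
                ((PySem.List.pyRange 1 (m+1) 1).map (fun c =>
                  pvInd (pvP b d a + pvP b d c))).sum)).sum) _
            (fun r d => by
              simp only
              -- the frequency dict IS the counter of the mapped value list
              have hfold : (PySem.List.pyRange 1 (m+1) 1).foldl
                    (fun dct x => dct.insert (pvP b d x) (dct.getD (pvP b d x) 0 + 1))
                    (PySem.Dict.empty)
                  = PySem.Dict.counter ((PySem.List.pyRange 1 (m+1) 1).map (pvP b d)) := by
                rw [← PySem.Dict.foldl_insert_getD_add_one_eq_counter, List.foldl_map]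
              simp only [pvP] at hfold
              rw [hfold, pv_items_pairs]
              simp only [List.map_map, Function.comp_def, pvP])])]
  rw [zero_add]

lemma pvA_eq (a b c d : Int) : pvA a b c d = pvInd (pvP b d a + pvP b d c) := by
  simp only [pvA, pvP]
  rw [Int.gcd_comm b c, Int.gcd_comm d a]
  ring_nf

lemma pv_sum4_perm {α : Type} (l : List α) (G : α → α → α → α → Int) :
    (l.map (fun a => (l.map (fun b => (l.map (fun c => (l.map (fun d => G a b c d)).sum)).sum)).sum)).sum
      = (l.map (fun b => (l.map (fun d => (l.map (fun a => (l.map (fun c => G a b c d)).sum)).sum)).sum)).sum := by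
  rw [pv_sum_swap (fun a b => (l.map (fun c => (l.map (fun d => G a b c d)).sum)).sum) l l]
  refine congrArg List.sum (List.map_congr_left ?_)
  intro b _
  have h1 : ∀ a ∈ l,
      (l.map (fun c => (l.map (fun d => G a b c d)).sum)).sum
        = (l.map (fun d => (l.map (fun c => G a b c d)).sum)).sum := by
    intro a _
    exact pv_sum_swap (fun c d => G a b c d) l l
  rw [congrArg List.sum (List.map_congr_left h1)]
  exact pv_sum_swap (fun a d => (l.map (fun c => G a b c d)).sum) l l

-- ===== VERDICT (by name: the statement is the Claim_ definition above) =====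
theorem solve_p504_spec : Claim_equal_solve_p504 := by
  intro m _
  unfold Spec_solve_p504
  rw [portA_sum, portB_sum]
  simp only [pvA_eq]
  exact pv_sum4_perm _ (fun a b c d => pvInd (pvP b d a + pvP b d c))
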